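-- pv_equiv track=rewrite | github.com/jeongy616/Algorithm-Study | books/It's Coding Test/implementation.py | solution2
-- ===== SOURCE A (Python) =====
-- def solution2(n):
--     result = 0
--     for i in range(n+1):
--         for j in range(60):
--             for k in range(60):
--                 if '3' in str(i)+str(j)+str(k):
--                     result+=1
--     return result
-- ===== SOURCE B (Python) =====
-- def _no3(q):
--     # True iff the decimal digits of q (q >= 0) avoid the digit 3
--     while q:
--         if q % 10 == 3:
--             return False
--         q //= 10
--     return True
--
--
-- def _count_no3(m):
--     # how many x in [0, m) have no digit 3, by digit recursion on m
--     if m == 0: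
--         return 0
--     q, b = divmod(m, 10)
--     low = b - 1 if b > 3 else b      # digits r < b with r != 3
--     return 9 * _count_no3(q) + (low if _no3(q) else 0)
--
--
-- def solution2(n):
--     # an i containing '3' yields 3600 pairs (j,k); any other i yields
--     # 3600 - 45*45 = 1575 (45 of the 60 j's and k's avoid '3')
--     m = n + 1
--     if m <= 0:
--         return 0
--     return 3600 * m - 2025 * _count_no3(m)
-- ===== Notes on version B (the rewrite author's own statement) =====
-- stated objective: faster
-- what changed: B replaces A's inner double loop over (j,k) by a per-i constant (the full pair count when str(i) contains a three, otherwise that count minus the square of the number of three-free values below sixty) and counts the i in [0,n] whose digits avoid three by a digit recursion, giving a closed form.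
import Mathlib
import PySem

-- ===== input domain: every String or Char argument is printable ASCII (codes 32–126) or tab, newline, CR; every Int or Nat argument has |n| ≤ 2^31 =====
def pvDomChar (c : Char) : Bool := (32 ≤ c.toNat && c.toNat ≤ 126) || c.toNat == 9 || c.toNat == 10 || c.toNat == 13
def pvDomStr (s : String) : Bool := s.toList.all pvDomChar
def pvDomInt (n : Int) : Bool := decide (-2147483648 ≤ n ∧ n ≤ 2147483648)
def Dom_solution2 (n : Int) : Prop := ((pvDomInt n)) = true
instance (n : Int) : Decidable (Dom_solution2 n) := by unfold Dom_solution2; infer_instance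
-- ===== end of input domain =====

-- B replaces A's triple loop by a closed form: the inner double loop contributes a
-- per-i constant depending only on whether a three occurs in str(i), and the count of
-- i in [0,n] whose digits avoid three is computed by a digit recursion.

-- ===== PORT A =====
def solution2 (n : Int) : Int :=
  (PySem.List.pyRange 0 (n + 1)).foldl (fun result i =>
    (PySem.List.pyRange 0 60).foldl (fun result j =>
      (PySem.List.pyRange 0 60).foldl (fun result k =>
        if PySem.Chars.isIn ['3']
            (PySem.Int.toChars i ++ PySem.Int.toChars j ++ PySem.Int.toChars k)
        then result + 1 else result) result) result) 0

-- ===== PORT B =====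
-- _no3(q): True iff the decimal digits of q avoid 3 (python's while-loop on q //= 10)
def no3 : Nat → Bool
  | 0 => true
  | q + 1 => ((q + 1) % 10 != 3) && no3 ((q + 1) / 10)
  decreasing_by exact Nat.div_lt_self (Nat.succ_pos q) (by norm_num)

-- _count_no3(m): numbers x in [0, m) with no digit 3, by digit recursion on m
def countNo3 : Nat → Int
  | 0 => 0
  | m + 1 =>
    9 * countNo3 ((m + 1) / 10) +
      (if no3 ((m + 1) / 10) then
        (if 3 < (m + 1) % 10 then (((m + 1) % 10 : Nat) : Int) - 1
         else (((m + 1) % 10 : Nat) : Int))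
      else 0)
  decreasing_by exact Nat.div_lt_self (Nat.succ_pos m) (by norm_num)

def solution2_alt (n : Int) : Int :=
  let m := n + 1
  if m ≤ 0 then 0 else 3600 * m - 2025 * countNo3 m.toNat

-- ===== PRECONDITION & SPEC =====
def Spec_solution2 (n : Int) (out : Int) : Prop := out = solution2_alt n
instance (n : Int) (out : Int) : Decidable (Spec_solution2 n out) := by unfold Spec_solution2; infer_instance

-- ===== CLAIM (what is proved, stated in full; the proofs are below) =====
def Claim_equal_solution2 : Prop := ∀ (n : Int), Dom_solution2 n → Spec_solution2 n (solution2 n)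

-- ===== LEMMAS AND PROOFS =====

lemma mem_singleton_infix {c : Char} {s : List Char} : [c] <:+: s ↔ c ∈ s := by
  constructor
  · intro h; exact h.subset (List.mem_singleton_self c)
  · intro h
    obtain ⟨s1, s2, rfl⟩ := List.mem_iff_append.mp h
    exact ⟨s1, s2, by simp⟩

lemma isIn3_eq_mem (s : List Char) :
    PySem.Chars.isIn ['3'] s = decide ('3' ∈ s) := by
  by_cases h : '3' ∈ s
  · simp [h, (PySem.Chars.isIn_iff_infix _ _).mpr (mem_singleton_infix.mpr h)]
  · simp only [h, decide_false]
    exact (PySem.Chars.isIn_eq_false_iff _ _).mpr (fun hi => h (mem_singleton_infix.mp hi))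

lemma isIn3_append (a b : List Char) :
    PySem.Chars.isIn ['3'] (a ++ b) =
      (PySem.Chars.isIn ['3'] a || PySem.Chars.isIn ['3'] b) := by
  simp [isIn3_eq_mem, List.mem_append, Bool.decide_or]

lemma digitChar_eq_three {r : Nat} (h : r < 10) : Nat.digitChar r = '3' ↔ r = 3 := by
  interval_cases r <;> simp [Nat.digitChar]

lemma mem_toDigitsCore (fuel : Nat) : ∀ (n : Nat) (ds : List Char), n < fuel →
    ('3' ∈ Nat.toDigitsCore 10 fuel n ds ↔ ('3' ∈ ds ∨ no3 n = false)) := by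
  induction fuel with
  | zero => intro n ds h; omega
  | succ f ih =>
    intro n ds h
    rw [Nat.toDigitsCore]
    have hd : ('3' = (n % 10).digitChar) ↔ n % 10 = 3 := by
      rw [eq_comm]; exact digitChar_eq_three (by omega)
    by_cases hz : n / 10 = 0
    · have hn : n < 10 := by omega
      have hno3 : no3 n = false ↔ n = 3 := by
        match n, hn with
        | 0, _ => simp [no3]
        | (m+1), hn =>
          rw [no3]
          have h10 : (m+1) / 10 = 0 := Nat.div_eq_of_lt hn
          have hm : (m+1) % 10 = m + 1 := Nat.mod_eq_of_lt hn
          simp [h10, hm, no3]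
      have hnn : n % 10 = n := Nat.mod_eq_of_lt hn
      rw [if_pos hz, List.mem_cons, hd, hnn, hno3]
      tauto
    · rw [if_neg hz]
      have hlt : n / 10 < f := by
        have := Nat.div_lt_self (Nat.pos_of_ne_zero (by omega : n ≠ 0)) (by norm_num : 1 < 10)
        omega
      rw [ih (n / 10) _ hlt]
      have hno3 : no3 n = ((n % 10 != 3) && no3 (n / 10)) := by
        match n, (by omega : n ≠ 0) with
        | (m+1), _ => rw [no3]
      rw [List.mem_cons, hd, hno3]
      cases hq : no3 (n / 10) <;> by_cases h3 : n % 10 = 3 <;> simp [h3]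

lemma isIn3_toChars (k : Nat) :
    PySem.Chars.isIn ['3'] (PySem.Int.toChars (k : Int)) = !no3 k := by
  have h1 : PySem.Int.toChars (k : Int) = Nat.toDigits 10 k := by
    simp [PySem.Int.toChars]
  have hmem := mem_toDigitsCore (k + 1) k [] (by omega)
  rw [h1, Nat.toDigits, isIn3_eq_mem]
  cases h : no3 k <;> simp [hmem, h]

-- the inner double loop adds a constant depending only on whether str(i) contains a three
lemma inner_fold (i r : Int) :
    (PySem.List.pyRange 0 60).foldl (fun result j =>
      (PySem.List.pyRange 0 60).foldl (fun result k =>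
        if PySem.Chars.isIn ['3']
            (PySem.Int.toChars i ++ PySem.Int.toChars j ++ PySem.Int.toChars k)
        then result + 1 else result) result) r
    = r + (if PySem.Chars.isIn ['3'] (PySem.Int.toChars i) then 3600 else 1575) := by
  cases h : PySem.Chars.isIn ['3'] (PySem.Int.toChars i) with
  | true =>
    simp only [isIn3_append, h, Bool.true_or, if_true]
    have step1 : ∀ r' : Int,
        (PySem.List.pyRange 0 60).foldl (fun (result : Int) (_ : Int) => result + 1) r'
          = r' + 60 := by
      intro r'
      rw [PySem.List.foldl_add _ (fun _ => (1 : Int))]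
      norm_num [show (List.map ((fun _ : Int => (1 : Int)) ∘ fun k : Nat => (k : Int))
        (List.range (Int.toNat 60))).sum = 60 from by decide, PySem.List.pyRange_one]
    simp only [step1]
    rw [PySem.List.foldl_add _ (fun _ => (60 : Int))]
    norm_num [show (List.map ((fun _ : Int => (60 : Int)) ∘ fun k : Nat => (k : Int))
      (List.range (Int.toNat 60))).sum = 3600 from by decide, PySem.List.pyRange_one]
  | false =>
    simp only [isIn3_append, h, Bool.false_or]
    simp only [PySem.List.foldl_if_add_one]
    rw [PySem.List.foldl_add]
    congr 1

lemma countNo3_formula (m : Nat) :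
    countNo3 m = 9 * countNo3 (m / 10) +
      (if no3 (m / 10) then
        (if 3 < m % 10 then ((m % 10 : Nat) : Int) - 1 else ((m % 10 : Nat) : Int)) else 0) := by
  match m with
  | 0 => simp [countNo3, no3]
  | m + 1 => rw [countNo3]

lemma no3_formula (m : Nat) : no3 m = ((m % 10 != 3) && no3 (m / 10)) := by
  match m with
  | 0 => simp [no3]
  | m + 1 => rw [no3]

lemma countNo3_succ : ∀ m : Nat, countNo3 (m + 1) = countNo3 m + (if no3 m then 1 else 0) := by
  intro m
  induction m using Nat.strong_induction_on with
  | _ m ih =>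
    by_cases h9 : m % 10 = 9
    · -- m = 10*q + 9, so m+1 = 10*(q+1): both sides add 9·[no3 q]
      have hq : (m + 1) / 10 = m / 10 + 1 := by omega
      have hq0 : (m + 1) % 10 = 0 := by omega
      rw [countNo3_formula (m + 1), hq, hq0, ih (m / 10) (by omega),
        countNo3_formula m, no3_formula m, h9]
      cases h : no3 (m / 10) <;> simp
      ring
    · -- same leading digits, last digit goes m%10 → m%10+1
      have hq : (m + 1) / 10 = m / 10 := by omega
      have hr : (m + 1) % 10 = m % 10 + 1 := by omega
      rw [countNo3_formula (m + 1), countNo3_formula m, no3_formula m, hq, hr]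
      cases h : no3 (m / 10)
      · simp
      · by_cases h3 : m % 10 = 3 <;> simp [h3] <;> omega

lemma sum_range_f : ∀ m : Nat,
    ((List.range m).map (fun k => if no3 k then (1575 : Int) else 3600)).sum
      = 3600 * m - 2025 * countNo3 m := by
  intro m
  induction m with
  | zero => simp [countNo3]
  | succ m ih =>
    rw [List.range_succ, List.map_append, List.sum_append, ih, countNo3_succ]
    cases h : no3 m <;> simp [h] <;> push_cast <;> omega

-- ===== VERDICT (by name: the statement is the Claim_ definition above) =====
theorem solution2_spec : Claim_equal_solution2 := by
  intro n _
  unfold Spec_solution2 solution2 solution2_alt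
  rw [PySem.List.foldl_congr_mem (PySem.List.pyRange 0 (n + 1))
    (fun result i =>
      (PySem.List.pyRange 0 60).foldl (fun result j =>
        (PySem.List.pyRange 0 60).foldl (fun result k =>
          if PySem.Chars.isIn ['3']
              (PySem.Int.toChars i ++ PySem.Int.toChars j ++ PySem.Int.toChars k)
          then result + 1 else result) result) result)
    (fun result i =>
      result + (if PySem.Chars.isIn ['3'] (PySem.Int.toChars i) then 3600 else 1575))
    0 (fun acc x _ => inner_fold x acc)]
  rw [PySem.List.foldl_add, PySem.List.pyRange_one, List.map_map]
  simp only [Function.comp_def, zero_add, isIn3_toChars]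
  rw [show ((List.range (n + 1 - 0).toNat).map
      (fun k => if (!no3 k) = true then (3600 : Int) else 1575)).sum
      = ((List.range (n + 1 - 0).toNat).map
      (fun k => if no3 k then (1575 : Int) else 3600)).sum from by
    congr 1; apply List.map_congr_left; intro k _; cases h : no3 k <;> simp]
  rw [sum_range_f]
  by_cases hle : n + 1 ≤ 0
  · simp [hle, show (n + 1).toNat = 0 by omega, countNo3]
  · rw [if_neg hle]
    have h2 : ((n + 1 - 0).toNat : Int) = n + 1 := by omega
    rw [h2]; ring
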